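-- pv_equiv track=rewrite | github.com/andrewroydshayes/rdc-proxy-unifi | rdc_proxy_unifi/poll.py | parse_switch_counters
-- ===== SOURCE A (Python) =====
-- def parse_switch_counters(text):
--     """Parse `swctrl port show counters id N` output into a flat dict of
--     ints. Lines are pipe-delimited key:value pairs."""
--     out = {}
--     for line in text.strip().split("\n"):
--         for part in line.split("|"):
--             part = part.strip()
--             if ":" not in part:
--                 continue
--             key, val = part.rsplit(":", 1)
--             try:
--                 out[key.strip()] = int(val.strip())
--             except ValueError:
--                 pass
--     return out
-- ===== SOURCE B (Python) =====
-- def parse_switch_counters(text):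
--     """Parse `swctrl port show counters id N` output into a flat dict of
--     ints. One character-level pass tokenises on both delimiters at once
--     instead of nested newline/pipe splits."""
--     out = {}
--     tokens = []
--     cur = []
--     for ch in text.strip():
--         if ch == "|" or ch == "\n":
--             tokens.append("".join(cur))
--             cur = []
--         else:
--             cur.append(ch)
--     tokens.append("".join(cur))
--     for token in tokens:
--         token = token.strip()
--         if ":" not in token:
--             continue
--         key, val = token.rsplit(":", 1)
--         try:
--             out[key.strip()] = int(val.strip())
--         except ValueError:
--             pass
--     return out
-- ===== Notes on version B (the rewrite author's own statement) =====
-- stated objective: alternative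
-- what changed: A's nested newline-then-pipe splits with an inner token loop are replaced by a single character-level pass that tokenises on both delimiters at once into one flat token list, followed by one loop over that list.
import Mathlib
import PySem

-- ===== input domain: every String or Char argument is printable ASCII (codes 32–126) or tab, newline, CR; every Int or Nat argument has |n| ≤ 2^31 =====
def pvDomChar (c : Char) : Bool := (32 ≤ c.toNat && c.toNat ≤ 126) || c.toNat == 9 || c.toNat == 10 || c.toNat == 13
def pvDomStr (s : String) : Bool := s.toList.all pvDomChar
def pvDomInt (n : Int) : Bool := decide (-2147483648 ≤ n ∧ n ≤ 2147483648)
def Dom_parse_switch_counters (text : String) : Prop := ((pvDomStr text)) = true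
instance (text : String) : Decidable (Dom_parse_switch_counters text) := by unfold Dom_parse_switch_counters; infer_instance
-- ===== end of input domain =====

-- B replaces A's nested newline/pipe splits by one character-level pass that tokenises
-- on both delimiters at once (objective: alternative decomposition, same cost).

-- ===== PORT A =====
-- shared token body (identical source lines in Source A and Source B): strip the token, skip it
-- if ':' is absent, split at the LAST colon (rsplit(':', 1) — exact here because ':' ∈ p,
-- so rfind points at the highest occurrence), int() the value, drop it on ValueError.
def pvStep (d : PySem.Dict String Int) (part : List Char) : PySem.Dict String Int :=
  let p := PySem.Chars.strip part
  if PySem.Chars.isIn [':'] p then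
    let i := (PySem.Chars.rfind p [':']).toNat
    let key := p.take i
    let val := p.drop (i + 1)
    match PySem.Int.ofChars? (PySem.Chars.strip val) with
    | some n => d.insert (String.ofList (PySem.Chars.strip key)) n
    | none => d
  else d

def parse_switch_counters (text : String) : List (String × Int) :=
  ((PySem.Chars.splitOn (PySem.Chars.strip text.toList) ['\n']).foldl
      (fun d line => (PySem.Chars.splitOn line ['|']).foldl pvStep d)
      PySem.Dict.empty).items

-- ===== PORT B =====
-- Source B's tokenizer loop: one pass over the characters, state = (finished tokens, current token)
def pvTokStep (st : List (List Char) × List Char) (ch : Char) : List (List Char) × List Char :=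
  if ch = '|' || ch = '\n' then (st.1 ++ [st.2], []) else (st.1, st.2 ++ [ch])

def parse_switch_counters_alt (text : String) : List (String × Int) :=
  let st := (PySem.Chars.strip text.toList).foldl pvTokStep ([], [])
  let tokens := st.1 ++ [st.2]
  (tokens.foldl pvStep PySem.Dict.empty).items

-- ===== PRECONDITION & SPEC =====
def Spec_parse_switch_counters (text : String) (out : List (String × Int)) : Prop := out = parse_switch_counters_alt text
instance (text : String) (out : List (String × Int)) : Decidable (Spec_parse_switch_counters text out) := by unfold Spec_parse_switch_counters; infer_instance

-- ===== CLAIM (what is proved, stated in full; the proofs are below) =====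
def Claim_equal_parse_switch_counters : Prop := ∀ (text : String), Dom_parse_switch_counters text → Spec_parse_switch_counters text (parse_switch_counters text)

-- ===== LEMMAS AND PROOFS =====

-- canonical split of a char list on a SINGLE delimiter char
def pvSplitOne (d : Char) : List Char → List (List Char)
  | [] => [[]]
  | c :: r => if c = d then [] :: pvSplitOne d r
              else match pvSplitOne d r with
                   | [] => [[c]]
                   | t :: ts => (c :: t) :: ts

-- canonical split on BOTH delimiter chars at once
def pvSplitAny : List Char → List (List Char)
  | [] => [[]]
  | c :: r => if c = '|' || c = '\n' then [] :: pvSplitAny r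
              else match pvSplitAny r with
                   | [] => [[c]]
                   | t :: ts => (c :: t) :: ts

-- prepend a prefix onto the first piece
def pvMergeHead (pre : List Char) : List (List Char) → List (List Char)
  | [] => [pre]
  | t :: ts => (pre ++ t) :: ts

theorem pvSplitOne_ne_nil (d : Char) (cs : List Char) : pvSplitOne d cs ≠ [] := by
  cases cs with
  | nil => simp [pvSplitOne]
  | cons c r => simp only [pvSplitOne]; split; · simp
                · split <;> simp

theorem pvSplitAny_ne_nil (cs : List Char) : pvSplitAny cs ≠ [] := by
  cases cs with
  | nil => simp [pvSplitAny]
  | cons c r => simp only [pvSplitAny]; split; · simp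
                · split <;> simp

theorem pvGo_spec (d : Char) (l : List Char) (fuel : Nat) (cur : List Char)
    (acc : List (List Char)) (h : l.length ≤ fuel) :
    PySem.Chars.splitOn.go [d] fuel l cur acc
      = acc.reverse ++ pvMergeHead cur.reverse (pvSplitOne d l) := by
  induction fuel generalizing l cur acc with
  | zero =>
    have : l = [] := by cases l <;> simp_all
    subst this
    rw [PySem.Chars.splitOn.go]
    simp [pvSplitOne, pvMergeHead]
  | succ f ih =>
    cases l with
    | nil =>
      rw [PySem.Chars.splitOn.go]
      · simp [pvSplitOne, pvMergeHead]
      · omega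
    | cons c rest =>
      rw [PySem.Chars.splitOn.go]
      by_cases hc : c = d
      · subst hc
        simp only [List.isPrefixOf, beq_self_eq_true, Bool.true_and, if_pos, List.length_cons,
          List.drop_succ_cons, List.length_nil, List.drop_zero]
        rw [ih rest [] _ (by simpa using Nat.lt_succ_iff.mp (by simpa using h))]
        cases hs : pvSplitOne c rest with
        | nil => exact absurd hs (pvSplitOne_ne_nil c rest)
        | cons t ts => simp [pvSplitOne, pvMergeHead, hs]
      · have hpre : List.isPrefixOf [d] (c :: rest) = false := by
          simp [List.isPrefixOf]; exact fun hdc => absurd hdc.symm hc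
        rw [if_neg (by simp [hpre])]
        rw [ih rest (c :: cur) acc (by simpa using Nat.lt_succ_iff.mp (by simpa using h))]
        cases hs : pvSplitOne d rest with
        | nil => exact absurd hs (pvSplitOne_ne_nil d rest)
        | cons t ts => simp [pvSplitOne, pvMergeHead, hs, hc]

theorem pvSplitOn_eq (d : Char) (cs : List Char) :
    PySem.Chars.splitOn cs [d] = pvSplitOne d cs := by
  rw [PySem.Chars.splitOn, pvGo_spec d cs (cs.length + 1) [] [] (by omega)]
  cases h : pvSplitOne d cs with
  | nil => exact absurd h (pvSplitOne_ne_nil d cs)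
  | cons t ts => simp [pvMergeHead]

-- the two nested single-char splits, flattened, give the combined split
theorem pvSplitAny_flat (cs : List Char) :
    (pvSplitOne '\n' cs).flatMap (pvSplitOne '|') = pvSplitAny cs := by
  induction cs with
  | nil => simp [pvSplitOne, pvSplitAny]
  | cons c r ih =>
    by_cases hn : c = '\n'
    · subst hn
      simp [pvSplitOne, pvSplitAny, List.flatMap_cons, ih]
    · by_cases hp : c = '|'
      · subst hp
        cases hs : pvSplitOne '\n' r with
        | nil => exact absurd hs (pvSplitOne_ne_nil _ r)
        | cons t ts =>
          simp only [pvSplitOne, if_neg (by decide : ¬ ('|' = '\n')), hs,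
            List.flatMap_cons, pvSplitAny]
          rw [← ih, hs]
          simp [List.flatMap_cons]
      · cases hs : pvSplitOne '\n' r with
        | nil => exact absurd hs (pvSplitOne_ne_nil _ r)
        | cons t ts =>
          have hflat : (pvSplitOne '|' t) ++ ts.flatMap (pvSplitOne '|') = pvSplitAny r := by
            rw [← ih, hs, List.flatMap_cons]
          simp only [pvSplitOne, if_neg hn, hs, List.flatMap_cons]
          cases hu : pvSplitOne '|' t with
          | nil => exact absurd hu (pvSplitOne_ne_nil _ t)
          | cons u us =>
            simp only [if_neg hp]
            simp only [pvSplitAny, Bool.or_eq_true]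
            rw [if_neg (by simp [hp, hn]), ← hflat, hu]
            simp

-- the tokenizer loop of B computes pvSplitAny
theorem pvTok_spec (cs : List Char) (ts : List (List Char)) (cur : List Char) :
    (cs.foldl pvTokStep (ts, cur)).1 ++ [(cs.foldl pvTokStep (ts, cur)).2]
      = ts ++ pvMergeHead cur (pvSplitAny cs) := by
  induction cs generalizing ts cur with
  | nil => simp [pvMergeHead, pvSplitAny]
  | cons c r ih =>
    by_cases hd : c = '|' || c = '\n'
    · simp only [List.foldl_cons, pvTokStep, if_pos hd]
      rw [ih]
      cases hs : pvSplitAny r with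
      | nil => exact absurd hs (pvSplitAny_ne_nil r)
      | cons t ts' => simp [pvSplitAny, pvMergeHead, hd, hs]
    · simp only [List.foldl_cons, pvTokStep, if_neg hd]
      rw [ih]
      cases hs : pvSplitAny r with
      | nil => exact absurd hs (pvSplitAny_ne_nil r)
      | cons t ts' => simp [pvSplitAny, pvMergeHead, hd, hs]

-- folding over a flatMap = the nested fold
theorem pvFoldl_flatMap {α β γ : Type} (g : α → List β) (f : γ → β → γ)
    (ls : List α) (d0 : γ) :
    (ls.flatMap g).foldl f d0 = ls.foldl (fun d x => (g x).foldl f d) d0 := by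
  induction ls generalizing d0 with
  | nil => rfl
  | cons x xs ih => simp [List.flatMap_cons, List.foldl_append, ih]

-- ===== VERDICT (by name: the statement is the Claim_ definition above) =====
theorem parse_switch_counters_spec : Claim_equal_parse_switch_counters := by
  intro text _
  unfold Spec_parse_switch_counters parse_switch_counters parse_switch_counters_alt
  simp only [pvSplitOn_eq]
  rw [← pvFoldl_flatMap (pvSplitOne '|') pvStep, pvSplitAny_flat]
  have := pvTok_spec (PySem.Chars.strip text.toList) [] []
  rw [this]
  cases hs : pvSplitAny (PySem.Chars.strip text.toList) with
  | nil => exact absurd hs (pvSplitAny_ne_nil _)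
  | cons t ts => simp [pvMergeHead]
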